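-- pv_equiv track=rewrite | github.com/Mrcsrobles/Nonograma | Nonograma.py | Factible
-- ===== SOURCE A (Python) =====
-- def Factible(T, row, data):
--     # Esta función dirá si la fila es factible para seguir o no
--     try:
--         pIni = T[row].index(
--             1)  # lo primero es ver si hay algún 1, si no lo hay quiere decir que es factible ya que las filas anteriores lo eran y no se ha añadido nada
--         iniciadoRow = False
--         for col in range(pIni, pIni + data["rows"][row]):  # Por cada columna desde el primer 1 todo revisar esto
--             iniciadoCol = False
--             acabadoCol = False
--             c = 0  # Contador de 1s
--             for rows in range(0, row + 1):  # Por cada fila hasta la actual (ya que el último no se incluye se pone +1)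
--                 val = T[rows][col]  # Almacenamos el valor
--                 if val == 0 and iniciadoCol:
--                     acabadoCol = True  # Si después de un uno hay un cero se da por terminada la serie
--                 elif val == 1 and acabadoCol:
--                     return False  # Si hay un uno después de haber acabado no es factible ya que hay un espacio
--                 elif val == 1 and not iniciadoCol:
--                     iniciadoCol = True  # El primer uno empiza a contar
--                     c += 1
--                 elif val == 1 and iniciadoCol:
--                     c += 1  # El resto de unos suman
--                 if c > data["cols"][col]:
--                     return False  # Si hay más 1 de los indicados en la columna no es factible
--         return True  # Si no se ha devuelto false todavía es que es factible
--
--     except ValueError:  # Si no hay ningún 1 se da este error en el .index y es factible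
--         return True
-- ===== SOURCE B (Python) =====
-- def Factible(T, row, data):
--     # Per-column check: collect the indices of 1s in the column band; reject a
--     # column if a 0 lies between the first and last 1, or if it has too many 1s.
--     try:
--         pIni = T[row].index(1)
--     except ValueError:
--         return True
--     for col in range(pIni, pIni + data["rows"][row]):
--         column = [T[r][col] for r in range(row + 1)]
--         ones = [r for r in range(row + 1) if T[r][col] == 1]
--         if ones and 0 in column[ones[0]:ones[-1]]:
--             return False
--         if len(ones) > data["cols"][col]:
--             return False
--     return True
-- ===== Notes on version B (the rewrite author's own statement) =====
-- stated objective: simpler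
-- what changed: A's per-column three-variable state machine (iniciadoCol/acabadoCol/c with four elif branches) is replaced by building the list of 1-positions per column and rejecting a column if a 0 lies in the slice between its first and last 1 or if it has more 1s than its clue.
-- outside the precondition, e.g. on Factible([[1, 1], [1]], 1, {'rows': [0, 2], 'cols': [5, 0]}): A returns False, B raises IndexError; on Factible([[1]], -1, {'rows': [1]}): A returns True, B raises KeyError; on Factible([[1]], -1, {'rows': [1], 'cols': [-1]}): A returns True, B returns False
import Mathlib
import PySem

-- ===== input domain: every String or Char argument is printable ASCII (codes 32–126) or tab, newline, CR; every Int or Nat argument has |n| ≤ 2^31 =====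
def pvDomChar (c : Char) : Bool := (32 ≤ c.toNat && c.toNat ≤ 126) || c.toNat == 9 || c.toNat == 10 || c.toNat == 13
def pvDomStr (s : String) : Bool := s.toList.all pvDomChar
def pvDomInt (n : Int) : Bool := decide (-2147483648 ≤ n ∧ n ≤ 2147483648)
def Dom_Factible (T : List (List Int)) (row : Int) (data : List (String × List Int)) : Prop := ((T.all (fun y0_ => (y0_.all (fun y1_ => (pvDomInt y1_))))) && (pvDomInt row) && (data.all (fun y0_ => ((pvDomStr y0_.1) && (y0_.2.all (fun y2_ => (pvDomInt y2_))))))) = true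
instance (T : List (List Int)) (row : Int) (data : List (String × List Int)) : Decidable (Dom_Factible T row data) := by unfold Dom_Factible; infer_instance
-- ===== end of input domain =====

-- B replaces A's three-variable per-column state machine by a per-column list of the
-- 1-positions, checked for an interior 0 (a slice membership test) and for its length
-- (objective: simpler decomposition; same asymptotic cost).

-- ===== PORT A =====
-- the value T[rows][col] (in range on every access made under Pre_)
def aVal (T : List (List Int)) (col r : Int) : Int :=
  PySem.List.pyGetD (PySem.List.pyGetD T r []) col 0

-- A's inner 'for rows in range(0, row+1)' loop, state (iniciadoCol, acabadoCol, c);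
-- false exactly when the Python hits a 'return False' while scanning this column.
def aScan (T : List (List Int)) (colsL : List Int) (col : Int) :
    List Int → Bool → Bool → Int → Bool
  | [], _, _, _ => true
  | r :: rs, ini, aca, c =>
    let val := aVal T col r
    if val = 0 ∧ ini then
      (if c > PySem.List.pyGetD colsL col 0 then false else aScan T colsL col rs ini true c)
    else if val = 1 ∧ aca then false
    else if val = 1 ∧ ini = false then
      (if c + 1 > PySem.List.pyGetD colsL col 0 then false else aScan T colsL col rs true aca (c + 1))
    else if val = 1 ∧ ini then
      (if c + 1 > PySem.List.pyGetD colsL col 0 then false else aScan T colsL col rs ini aca (c + 1))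
    else
      (if c > PySem.List.pyGetD colsL col 0 then false else aScan T colsL col rs ini aca c)


-- A's outer 'for col in range(pIni, pIni + data["rows"][row])' loop
def aCols (T : List (List Int)) (row : Int) (colsL : List Int) : List Int → Bool
  | [] => true
  | col :: rest =>
    if aScan T colsL col (PySem.List.pyRange 0 (row + 1) 1) false false 0 then
      aCols T row colsL rest
    else false

def Factible (T : List (List Int)) (row : Int) (data : List (String × List Int)) : Bool :=
  match PySem.List.index? (PySem.List.pyGetD T row []) 1 with
  | none => true      -- except ValueError: return True
  | some pIni =>
    aCols T row ((PySem.Dict.mk data).getD "cols" [])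
      (PySem.List.pyRange (pIni : Int)
        ((pIni : Int) + PySem.List.pyGetD ((PySem.Dict.mk data).getD "rows" []) row 0) 1)

-- ===== PORT B =====
-- one column of B: ones = positions of the 1s; reject an interior 0 or too many 1s
def bColOk (T : List (List Int)) (row : Int) (colsL : List Int) (col : Int) : Bool :=
  let column := (PySem.List.pyRange 0 (row + 1) 1).map
      (fun r => PySem.List.pyGetD (PySem.List.pyGetD T r []) col 0)
  let ones := (PySem.List.pyRange 0 (row + 1) 1).filter
      (fun r => PySem.List.pyGetD (PySem.List.pyGetD T r []) col 0 == 1)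
  if ones ≠ [] ∧ (PySem.List.slice column (some (PySem.List.pyGetD ones 0 0))
        (some (PySem.List.pyGetD ones (-1) 0))).contains 0 then false
  else if (ones.length : Int) > PySem.List.pyGetD colsL col 0 then false
  else true

def bCols (T : List (List Int)) (row : Int) (colsL : List Int) : List Int → Bool
  | [] => true
  | col :: rest => if bColOk T row colsL col then bCols T row colsL rest else false

def Factible_alt (T : List (List Int)) (row : Int) (data : List (String × List Int)) : Bool :=
  match PySem.List.index? (PySem.List.pyGetD T row []) 1 with
  | none => true      -- except ValueError: return True
  | some pIni =>
    bCols T row ((PySem.Dict.mk data).getD "cols" [])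
      (PySem.List.pyRange (pIni : Int)
        ((pIni : Int) + PySem.List.pyGetD ((PySem.Dict.mk data).getD "rows" []) row 0) 1)

-- ===== PRECONDITION & SPEC =====
-- Pre_ keeps the natural nonogram domain.  It excludes: inputs on which A raises
-- (row or the "rows" clue index outside Python's index range, a missing "rows" key, a
-- clue/board cell accessed out of range); ragged/short boards or clue lists on which A's
-- occasional False merely precedes the IndexError of the very next cell, where B raises
-- IndexError/KeyError too; and the negative-row-with-a-1 wraparound corner with a missing
-- "cols" key or a negative clue in the band, where A's inner scan is empty by wraparound
-- accident and B raises KeyError or returns False.  Negative rows with nonnegative band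
-- clues stay inside and are proved equal.
def Pre_Factible (T : List (List Int)) (row : Int) (data : List (String × List Int)) : Prop :=
  -(T.length : Int) ≤ row ∧ row < (T.length : Int) ∧
  (1 ∈ PySem.List.pyGetD T row [] →
    (PySem.Dict.mk data).contains "rows" = true ∧
    -((((PySem.Dict.mk data).getD "rows" []).length : Int)) ≤ row ∧
    row < (((PySem.Dict.mk data).getD "rows" []).length : Int) ∧
    (0 < PySem.List.pyGetD ((PySem.Dict.mk data).getD "rows" []) row 0 →
      (PySem.Dict.mk data).contains "cols" = true ∧
      (((PySem.List.index? (PySem.List.pyGetD T row []) 1).getD 0 : Int) +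
          PySem.List.pyGetD ((PySem.Dict.mk data).getD "rows" []) row 0 ≤
        (((PySem.Dict.mk data).getD "cols" []).length : Int)) ∧
      (0 ≤ row →
        ∀ r ∈ PySem.List.pyRange 0 (row + 1) 1,
          ((PySem.List.index? (PySem.List.pyGetD T row []) 1).getD 0 : Int) +
              PySem.List.pyGetD ((PySem.Dict.mk data).getD "rows" []) row 0 ≤
            ((PySem.List.pyGetD T r []).length : Int)) ∧
      (row < 0 →
        ∀ col ∈ PySem.List.pyRange
            (((PySem.List.index? (PySem.List.pyGetD T row []) 1).getD 0 : Int))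
            (((PySem.List.index? (PySem.List.pyGetD T row []) 1).getD 0 : Int) +
              PySem.List.pyGetD ((PySem.Dict.mk data).getD "rows" []) row 0) 1,
          0 ≤ PySem.List.pyGetD ((PySem.Dict.mk data).getD "cols" []) col 0)))

instance (T : List (List Int)) (row : Int) (data : List (String × List Int)) :
    Decidable (Pre_Factible T row data) := by unfold Pre_Factible; infer_instance

def pvWitness_Factible : List (List Int) × Int × (List (String × List Int)) :=
  ([[1]], 0, [("rows", [1]), ("cols", [1])])

def Spec_Factible (T : List (List Int)) (row : Int) (data : List (String × List Int)) (out : Bool) : Prop := out = Factible_alt T row data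
instance (T : List (List Int)) (row : Int) (data : List (String × List Int)) (out : Bool) : Decidable (Spec_Factible T row data out) := by unfold Spec_Factible; infer_instance

-- ===== CLAIM (what is proved, stated in full; the proofs are below) =====
def Claim_equal_Factible : Prop := ∀ (T : List (List Int)) (row : Int) (data : List (String × List Int)), Dom_Factible T row data → Pre_Factible T row data → Spec_Factible T row data (Factible T row data)

-- ===== LEMMAS AND PROOFS =====

-- A 0 somewhere in vs followed (strictly later) by a 1
def afterOne : List Int → Bool
  | [] => false
  | v :: vs => if v = 0 then vs.contains 1 else afterOne vs

-- a 1, later a 0, later again a 1 (A's "gap" rejection) in vs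
def hasGap : List Int → Bool
  | [] => false
  | v :: vs => if v = 1 then afterOne vs else hasGap vs

lemma aScan_done (T : List (List Int)) (colsL : List Int) (col : Int) :
    ∀ (rs : List Int) (c : Int), c ≤ PySem.List.pyGetD colsL col 0 →
      aScan T colsL col rs true true c = !((rs.map (aVal T col)).contains 1) := by
  intro rs
  induction rs with
  | nil => intro c hc; simp [aScan]
  | cons r rs ih =>
      intro c hc
      by_cases h1 : aVal T col r = 1
      · simp [aScan, h1]
      · by_cases h0 : aVal T col r = 0
        · simp [aScan, h0, h1, not_lt.mpr hc, ih c hc]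
        · simp [aScan, h0, h1, not_lt.mpr hc, ih c hc]
          exact fun _ he => h1 he.symm

lemma count_one_eq_zero_of_not_contains (vs : List Int) (h : vs.contains 1 = false) :
    vs.count 1 = 0 := by
  simp [List.count_eq_zero]
  simpa using h

lemma aScan_run (T : List (List Int)) (colsL : List Int) (col : Int) :
    ∀ (rs : List Int) (c : Int), c ≤ PySem.List.pyGetD colsL col 0 →
      aScan T colsL col rs true false c =
        (!afterOne (rs.map (aVal T col)) &&
          decide (c + ((rs.map (aVal T col)).count 1 : Int) ≤ PySem.List.pyGetD colsL col 0)) := by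
  intro rs
  induction rs with
  | nil => intro c hc; simp [aScan, afterOne]; omega
  | cons r rs ih =>
      intro c hc
      by_cases h0 : aVal T col r = 0
      · have h1 : ¬ aVal T col r = 1 := by rw [h0]; decide
        simp only [List.map_cons, aScan, h0, h1, afterOne, List.count_cons, if_pos rfl,
          true_and, and_true, not_lt.mpr hc, if_false, if_true,
          aScan_done T colsL col rs c hc]
        cases hmem : (rs.map (aVal T col)).contains 1 with
        | false =>
            have hz := count_one_eq_zero_of_not_contains _ hmem
            simp [hz, h1, hmem]
            omega
        | true => simp [hmem, h1]
      · by_cases h1 : aVal T col r = 1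
        · simp only [List.map_cons, aScan, h0, h1, afterOne, List.count_cons, false_and,
            if_false, and_false, and_true, true_and, if_neg h0, if_pos rfl,
            Bool.true_eq_false, if_true]
          by_cases hcm : c + 1 > PySem.List.pyGetD colsL col 0
          · have : ¬ (c + (((rs.map (aVal T col)).count 1 + 1 : Nat) : Int) ≤ PySem.List.pyGetD colsL col 0) := by
              push_cast; omega
            simp [hcm, this, h1]
            intro _
            omega
          · simp only [if_neg hcm, ih (c+1) (by omega), hcm, if_false]
            norm_num
            congr 1
            rw [decide_eq_decide]
            omega
        · simp only [List.map_cons, aScan, h0, h1, afterOne, List.count_cons, false_and,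
            if_false, and_false, and_true, true_and, if_neg h0, if_neg h1,
            not_lt.mpr hc, ih c hc]
          simp [h0, h1]
          try exact fun _ he => h1 he.symm

lemma aScan_start (T : List (List Int)) (colsL : List Int) (col : Int) :
    ∀ (rs : List Int), rs ≠ [] →
      aScan T colsL col rs false false 0 =
        (!hasGap (rs.map (aVal T col)) &&
          decide (((rs.map (aVal T col)).count 1 : Int) ≤ PySem.List.pyGetD colsL col 0)) := by
  intro rs
  induction rs with
  | nil => intro h; exact absurd rfl h
  | cons r rs ih =>
      intro _
      by_cases h1 : aVal T col r = 1
      · have h0 : ¬ aVal T col r = 0 := by rw [h1]; decide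
        simp only [List.map_cons, aScan, h0, h1, hasGap, List.count_cons, if_neg h0,
          if_pos rfl, and_false, if_false, Bool.false_eq_true, and_true]
        by_cases hcm : (0:Int) + 1 > PySem.List.pyGetD colsL col 0
        · have h2 : PySem.List.pyGetD colsL col 0 < 1 := by omega
          have h3 : ¬ ((((rs.map (aVal T col)).count 1 : Nat) : Int) + 1 ≤ PySem.List.pyGetD colsL col 0) := by
            have : (0:Int) ≤ ((rs.map (aVal T col)).count 1 : Nat) := by positivity
            omega
          simp [h2, h3, h1]
        · simp only [if_neg hcm, ite_true, ite_false]
          rw [show (0:Int) + 1 = 1 by norm_num, aScan_run T colsL col rs 1 (by omega)]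
          norm_num
          congr 1
          rw [decide_eq_decide]
          omega
      · by_cases hnil : rs = []
        · subst hnil
          simp [aScan, hasGap, h1]
          by_cases hm : (0:Int) ≤ PySem.List.pyGetD colsL col 0
          · simp [hm, not_lt.mpr hm]
          · simp [hm]
            omega
        · simp only [List.map_cons, aScan, h1, hasGap, List.count_cons, and_false, if_false,
            and_true, ih hnil]
          by_cases h0 : aVal T col r = 0
          all_goals simp [h0, h1]
          all_goals intro _ h
          all_goals omega

def Gap (vs : List Int) : Prop :=
  ∃ i k j : Nat, i < k ∧ k < j ∧ j < vs.length ∧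
    vs.getD i 0 = 1 ∧ vs.getD k 0 = 0 ∧ vs.getD j 0 = 1

lemma contains_one_iff (vs : List Int) :
    vs.contains 1 = true ↔ ∃ j : Nat, j < vs.length ∧ vs.getD j 0 = 1 := by
  rw [List.contains_iff_mem, List.mem_iff_getElem]
  constructor
  · rintro ⟨i, h, hi⟩
    exact ⟨i, h, by rw [List.getD_eq_getElem vs 0 h]; exact hi⟩
  · rintro ⟨j, hj, h1⟩
    exact ⟨j, hj, by rw [List.getD_eq_getElem vs 0 hj] at h1; exact h1⟩

lemma afterOne_iff (vs : List Int) :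
    afterOne vs = true ↔
      ∃ k j : Nat, k < j ∧ j < vs.length ∧ vs.getD k 0 = 0 ∧ vs.getD j 0 = 1 := by
  induction vs with
  | nil =>
      simp only [afterOne]
      constructor
      · intro h; exact absurd h (by decide)
      · rintro ⟨k, j, _, hj, _⟩; simp at hj
  | cons v vs ih =>
      by_cases h0 : v = 0
      · subst h0
        rw [show afterOne (0 :: vs) = vs.contains 1 from by simp [afterOne]]
        rw [contains_one_iff]
        constructor
        · rintro ⟨j, hj, h1⟩
          exact ⟨0, j + 1, by omega, by simpa using hj, by simp, by simpa using h1⟩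
        · rintro ⟨k, j, hkj, hj, _, h1⟩
          cases j with
          | zero => omega
          | succ j' => exact ⟨j', by simpa using hj, by simpa using h1⟩
      · rw [show afterOne (v :: vs) = afterOne vs from by simp [afterOne, h0]]
        rw [ih]
        constructor
        · rintro ⟨k, j, hkj, hj, hk0, hj1⟩
          exact ⟨k + 1, j + 1, by omega, by simpa using hj, by simpa using hk0,
            by simpa using hj1⟩
        · rintro ⟨k, j, hkj, hj, hk0, hj1⟩
          cases k with
          | zero => simp at hk0; exact absurd hk0 h0
          | succ k' =>
              cases j with
              | zero => omega
              | succ j' =>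
                  exact ⟨k', j', by omega, by simpa using hj, by simpa using hk0,
                    by simpa using hj1⟩

lemma hasGap_iff (vs : List Int) : hasGap vs = true ↔ Gap vs := by
  induction vs with
  | nil =>
      simp only [hasGap]
      constructor
      · intro h; exact absurd h (by decide)
      · rintro ⟨i, k, j, _, _, hj, _⟩; simp at hj
  | cons v vs ih =>
      by_cases h1 : v = 1
      · subst h1
        rw [show hasGap (1 :: vs) = afterOne vs from by simp [hasGap]]
        constructor
        · intro h
          obtain ⟨k, j, hkj, hj, hk0, hj1⟩ := (afterOne_iff vs).1 h
          exact ⟨0, k + 1, j + 1, by omega, by omega, by simpa using hj, by simp,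
            by simpa using hk0, by simpa using hj1⟩
        · rintro ⟨i, k, j, hik, hkj, hj, hi1, hk0, hj1⟩
          cases k with
          | zero => omega
          | succ k' =>
              cases j with
              | zero => omega
              | succ j' =>
                  exact (afterOne_iff vs).2 ⟨k', j', by omega, by simpa using hj,
                    by simpa using hk0, by simpa using hj1⟩
      · rw [show hasGap (v :: vs) = hasGap vs from by simp [hasGap, h1]]
        rw [ih]
        constructor
        · rintro ⟨i, k, j, hik, hkj, hj, hi1, hk0, hj1⟩
          exact ⟨i + 1, k + 1, j + 1, by omega, by omega, by simpa using hj,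
            by simpa using hi1, by simpa using hk0, by simpa using hj1⟩
        · rintro ⟨i, k, j, hik, hkj, hj, hi1, hk0, hj1⟩
          cases i with
          | zero => simp at hi1; exact absurd hi1 h1
          | succ i' =>
              cases k with
              | zero => omega
              | succ k' =>
                  cases j with
                  | zero => omega
                  | succ j' =>
                      exact ⟨i', k', j', by omega, by omega, by simpa using hj,
                        by simpa using hi1, by simpa using hk0, by simpa using hj1⟩

lemma sorted_head_le (a : Nat) (t : List Nat) (hs : (a :: t).Pairwise (· < ·))
    (x : Nat) (hx : x ∈ a :: t) : a ≤ x := by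
  rcases List.mem_cons.1 hx with h | h
  · omega
  · exact le_of_lt ((List.pairwise_cons.1 hs).1 x h)

lemma sorted_le_getLast (l : List Nat) (h : l ≠ []) (hs : l.Pairwise (· < ·)) :
    ∀ x ∈ l, x ≤ l.getLast h := by
  induction l with
  | nil => exact absurd rfl h
  | cons a t ih =>
      intro x hx
      by_cases htne : t = []
      · subst htne
        simp at hx
        simp [hx]
      · rw [List.getLast_cons htne]
        rcases List.mem_cons.1 hx with hxa | hxt
        · subst hxa
          have : x < t.getLast htne :=
            (List.pairwise_cons.1 hs).1 _ (List.getLast_mem htne)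
          omega
        · exact ih htne (List.pairwise_cons.1 hs).2 x hxt

lemma slice_contains_zero_iff (vs : List Int) (f l : Nat) (hfl : f ≤ l) (hln : l < vs.length) :
    (PySem.List.slice vs (some (f : Int)) (some (l : Int))).contains 0 = true ↔
      ∃ t : Nat, f ≤ t ∧ t < l ∧ vs.getD t 0 = 0 := by
  rw [PySem.List.slice_natCast, List.contains_iff_mem, List.mem_take_iff_getElem]
  constructor
  · rintro ⟨q, hq, hget⟩
    have hq1 : q < l - f := lt_of_lt_of_le hq (min_le_left _ _)
    have hq2 : q < (vs.drop f).length := lt_of_lt_of_le hq (min_le_right _ _)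
    refine ⟨f + q, by omega, by omega, ?_⟩
    have hfq : f + q < vs.length := by simp at hq2; omega
    rw [List.getD_eq_getElem vs 0 hfq]
    rw [List.getElem_drop] at hget
    exact hget
  · rintro ⟨t, hft, htl, ht0⟩
    have htn : t < vs.length := by omega
    refine ⟨t - f, by simp; omega, ?_⟩
    have : f + (t - f) < vs.length := by omega
    rw [List.getElem_drop]
    rw [List.getD_eq_getElem vs 0 htn] at ht0
    have hfq : f + (t - f) = t := by omega
    simp [hfq]
    exact ht0

lemma bCond_iff_gap (vs : List Int) (ones : List Int)
    (hones : ones = (PySem.List.pyRange 0 (vs.length : Int) 1).filter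
      (fun r => PySem.List.pyGetD vs r 0 == 1)) :
    (ones ≠ [] ∧ (PySem.List.slice vs (some (PySem.List.pyGetD ones 0 0))
        (some (PySem.List.pyGetD ones (-1) 0))).contains 0 = true) ↔ Gap vs := by
  have hones' : ones = ((List.range vs.length).filter
      (fun k => vs.getD k 0 == 1)).map (fun k : Nat => (k : Int)) := by
    rw [hones, PySem.List.pyRange_zero_natCast, List.filter_map]
    refine congrArg (List.map (fun k : Nat => (k : Int))) (List.filter_congr ?_)
    intro k _
    simp [Function.comp, PySem.List.pyGetD_natCast]
  subst hones'
  have hmem : ∀ k, k ∈ (List.range vs.length).filter (fun k => vs.getD k 0 == 1) ↔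
      k < vs.length ∧ vs.getD k 0 = 1 := by
    intro k
    simp [List.mem_filter, List.mem_range]
  have hpair : ((List.range vs.length).filter (fun k => vs.getD k 0 == 1)).Pairwise (· < ·) :=
    List.Pairwise.filter _ List.pairwise_lt_range
  by_cases hnil : (List.range vs.length).filter (fun k => vs.getD k 0 == 1) = []
  · rw [hnil]
    simp only [List.map_nil, ne_eq, not_true_eq_false, false_and]
    constructor
    · intro h; exact h.elim
    · rintro ⟨i, k, j, hik, hkj, hj, hi1, _, _⟩
      have : i ∈ (List.range vs.length).filter (fun k => vs.getD k 0 == 1) :=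
        (hmem i).2 ⟨by omega, hi1⟩
      rw [hnil] at this
      simp at this
  · obtain ⟨a, t, hat⟩ := List.exists_cons_of_ne_nil hnil
    rw [hat] at hpair hmem ⊢
    have hmne : (a :: t).map (fun k : Nat => (k : Int)) ≠ [] := by simp
    have hhead : PySem.List.pyGetD ((a :: t).map (fun k : Nat => (k : Int))) 0 0 = ((a : Nat) : Int) := by
      rw [List.map_cons, PySem.List.pyGetD_zero_cons]
    have hlast : PySem.List.pyGetD ((a :: t).map (fun k : Nat => (k : Int))) (-1) 0 =
        (((a :: t).getLast (List.cons_ne_nil a t) : Nat) : Int) := by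
      rw [PySem.List.pyGetD_neg_one _ 0 hmne]
      exact List.getLast_map hmne
    have hfm : a ∈ a :: t := List.mem_cons_self
    have hlm : (a :: t).getLast (List.cons_ne_nil a t) ∈ a :: t := List.getLast_mem _
    have hf1 : vs.getD a 0 = 1 := ((hmem _).1 hfm).2
    have hl1 : vs.getD ((a :: t).getLast (List.cons_ne_nil a t)) 0 = 1 := ((hmem _).1 hlm).2
    have hln : (a :: t).getLast (List.cons_ne_nil a t) < vs.length := ((hmem _).1 hlm).1
    have hfl : a ≤ (a :: t).getLast (List.cons_ne_nil a t) :=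
      sorted_le_getLast _ (List.cons_ne_nil a t) hpair a hfm
    rw [hhead, hlast, slice_contains_zero_iff vs _ _ hfl hln]
    constructor
    · rintro ⟨-, t', hft, htl, ht0⟩
      refine ⟨a, t', _, ?_, htl, hln, hf1, ht0, hl1⟩
      rcases Nat.lt_or_ge a t' with h | h
      · exact h
      · have heq : a = t' := by omega
        rw [heq] at hf1
        rw [hf1] at ht0
        exact absurd ht0 (by decide)
    · rintro ⟨i, k, j, hik, hkj, hj, hi1, hk0, hj1⟩
      have him : i ∈ a :: t := (hmem i).2 ⟨by omega, hi1⟩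
      have hjm : j ∈ a :: t := (hmem j).2 ⟨hj, hj1⟩
      have hfi : a ≤ i := sorted_head_le a t hpair i him
      have hjl : j ≤ (a :: t).getLast (List.cons_ne_nil a t) :=
        sorted_le_getLast _ (List.cons_ne_nil a t) hpair j hjm
      exact ⟨hmne, k, by omega, by omega, hk0⟩

lemma col_eq (T : List (List Int)) (row : Int) (colsL : List Int) (col : Int)
    (hrow : 0 ≤ row) :
    aScan T colsL col (PySem.List.pyRange 0 (row + 1) 1) false false 0 =
      bColOk T row colsL col := by
  have hne : PySem.List.pyRange 0 (row + 1) 1 ≠ [] := by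
    intro h
    have hlen : (PySem.List.pyRange 0 (row + 1) 1).length = (row + 1 - 0).toNat :=
      PySem.List.length_pyRange_one 0 (row + 1)
    rw [h] at hlen
    simp at hlen
    omega
  rw [aScan_start T colsL col _ hne]
  unfold bColOk
  have hv : (fun r => PySem.List.pyGetD (PySem.List.pyGetD T r []) col 0) = aVal T col := rfl
  have hv' : (fun r => PySem.List.pyGetD (PySem.List.pyGetD T r []) col 0 == 1)
      = (fun r => aVal T col r == 1) := rfl
  simp only [hv, hv']
  have hlen : (((PySem.List.pyRange 0 (row + 1) 1).map (aVal T col)).length : Int) = row + 1 := by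
    simp [PySem.List.length_pyRange_one]
    omega
  have hfilter : (PySem.List.pyRange 0 (row + 1) 1).filter (fun r => aVal T col r == 1)
      = (PySem.List.pyRange 0 ((((PySem.List.pyRange 0 (row + 1) 1).map (aVal T col)).length : Nat) : Int) 1).filter
          (fun r => PySem.List.pyGetD ((PySem.List.pyRange 0 (row + 1) 1).map (aVal T col)) r 0 == 1) := by
    rw [hlen]
    refine (List.filter_congr ?_).symm
    intro r hr
    obtain ⟨h0, h1⟩ := PySem.List.mem_pyRange_one.1 hr
    rw [PySem.List.pyGetD_map_pyRange_of_nonneg (aVal T col) (row + 1) r 0 h0 h1]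
  have hgap := bCond_iff_gap ((PySem.List.pyRange 0 (row + 1) 1).map (aVal T col)) _ hfilter
  rw [← hasGap_iff] at hgap
  by_cases hg : hasGap ((PySem.List.pyRange 0 (row + 1) 1).map (aVal T col)) = true
  · have hcond := hgap.mpr hg
    simp only [hg, Bool.not_true, Bool.false_and]
    rw [if_pos hcond]
  · rw [if_neg (fun hc => hg (hgap.mp hc))]
    have hb : hasGap ((PySem.List.pyRange 0 (row + 1) 1).map (aVal T col)) = false := by
      simpa using hg
    have hcount : ((PySem.List.pyRange 0 (row + 1) 1).filter (fun r => aVal T col r == 1)).length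
        = ((PySem.List.pyRange 0 (row + 1) 1).map (aVal T col)).count 1 := by
      rw [List.count_eq_countP, List.countP_map, List.countP_eq_length_filter]
      rfl
    rw [hb, hcount]
    by_cases hm : (((PySem.List.pyRange 0 (row + 1) 1).map (aVal T col)).count 1 : Int) ≤
        PySem.List.pyGetD colsL col 0
    · simp [hm, not_lt.mpr hm]
    · simp [hm]
      omega

-- a negative row makes the inner row range empty on both sides; a nonnegative clue
-- then lets both columns pass
lemma col_eq_neg (T : List (List Int)) (row : Int) (colsL : List Int) (col : Int)
    (hrow : row < 0) (hclue : 0 ≤ PySem.List.pyGetD colsL col 0) :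
    aScan T colsL col (PySem.List.pyRange 0 (row + 1) 1) false false 0 =
      bColOk T row colsL col := by
  have hempty : PySem.List.pyRange 0 (row + 1) 1 = [] := by
    apply List.eq_nil_of_length_eq_zero
    rw [PySem.List.length_pyRange_one]
    omega
  rw [hempty]
  unfold bColOk
  rw [hempty]
  simp [aScan, not_lt.mpr hclue]

lemma cols_eq_mem (T : List (List Int)) (row : Int) (colsL : List Int) :
    ∀ band : List Int,
      (∀ col ∈ band,
        aScan T colsL col (PySem.List.pyRange 0 (row + 1) 1) false false 0 =
          bColOk T row colsL col) →
      aCols T row colsL band = bCols T row colsL band := by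
  intro band
  induction band with
  | nil => intro _; rfl
  | cons col rest ih =>
      intro h
      simp only [aCols, bCols, h col List.mem_cons_self,
        ih (fun c hc => h c (List.mem_cons_of_mem _ hc))]

-- ===== VERDICT (by name: the statement is the Claim_ definition above) =====
theorem Factible_spec : Claim_equal_Factible := by
  intro T row data _ hpre
  unfold Spec_Factible Factible Factible_alt
  cases h : PySem.List.index? (PySem.List.pyGetD T row []) 1 with
  | none => rfl
  | some p =>
      have hmem : 1 ∈ PySem.List.pyGetD T row [] :=
        (PySem.List.index?_isSome_iff _ _).1 (by rw [h]; rfl)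
      apply cols_eq_mem
      intro col hcol
      by_cases hrow : 0 ≤ row
      · exact col_eq T row _ col hrow
      · apply col_eq_neg T row _ col (by omega)
        obtain ⟨hc, hc2⟩ := PySem.List.mem_pyRange_one.1 hcol
        have hpos : 0 < PySem.List.pyGetD ((PySem.Dict.mk data).getD "rows" []) row 0 := by
          omega
        have hband := (((hpre.2.2 hmem).2.2.2 hpos).2.2.2) (by omega)
        apply hband
        rw [PySem.List.mem_pyRange_one, h]
        simpa using And.intro hc hc2
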